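-- pv_equiv track=rewrite | github.com/MarioXHK/complex-text-based-games | python/pizzalike/milk.py | cornerchecker
-- ===== SOURCE A (Python) =====
-- def solidcheck(thing, inv = False):
--     #Thing is the thing checked if nonsolid, if inv is true then It'll send the opposite
--     nonsolid = {0,3,9}
--     if not thing in nonsolid:
--         if inv:
--             return False
--         else:
--             return True
--     else:
--         if inv:
--             return True
--         else:
--             return False
--
-- def cornerchecker(mop,og,cords):
--     mep = [[],[],[]]
--     for a in range(3):
--         for b in range(3):
--             try:
--                 mep[a].append(mop[cords[0]+a-1][cords[1]+b-1])
--             except: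
--                 mep[a].append([1])
--     if solidcheck(mep[0][0][0]) and solidcheck(mep[0][1][0]) and solidcheck(mep[0][2][0]) and solidcheck(mep[1][0][0]) and solidcheck(mep[1][2][0]) and solidcheck(mep[2][0][0], True) and solidcheck(mep[2][1][0]) and solidcheck(mep[2][2][0], True):
--         return [6,1]
--     elif solidcheck(mep[0][0][0], True) and solidcheck(mep[0][1][0]) and solidcheck(mep[0][2][0], True) and solidcheck(mep[1][0][0]) and solidcheck(mep[1][2][0]) and solidcheck(mep[2][0][0]) and solidcheck(mep[2][1][0]) and solidcheck(mep[2][2][0]):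
--         return [6,2]
--     elif solidcheck(mep[0][0][0], True) and solidcheck(mep[0][1][0]) and solidcheck(mep[0][2][0]) and solidcheck(mep[1][0][0]) and solidcheck(mep[1][2][0]) and solidcheck(mep[2][0][0], True) and solidcheck(mep[2][1][0]) and solidcheck(mep[2][2][0]):
--         return [7,3]
--     elif solidcheck(mep[0][0][0]) and solidcheck(mep[0][1][0]) and solidcheck(mep[0][2][0], True) and solidcheck(mep[1][0][0]) and solidcheck(mep[1][2][0]) and solidcheck(mep[2][0][0]) and solidcheck(mep[2][1][0]) and solidcheck(mep[2][2][0], True):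
--         return [6,3]
--     elif solidcheck(mep[0][0][0], True) and solidcheck(mep[0][1][0]) and solidcheck(mep[0][2][0], True) and solidcheck(mep[1][0][0]) and solidcheck(mep[1][2][0]) and solidcheck(mep[2][0][0], True) and solidcheck(mep[2][1][0]) and solidcheck(mep[2][2][0], True):
--         return [6,4]
--     elif solidcheck(mep[0][0][0]) and solidcheck(mep[0][1][0]) and solidcheck(mep[0][2][0], True) and solidcheck(mep[1][0][0]) and solidcheck(mep[1][2][0]) and solidcheck(mep[2][0][0], True) and solidcheck(mep[2][1][0]) and solidcheck(mep[2][2][0], True):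
--         return [5,4]
--     elif solidcheck(mep[0][0][0], True) and solidcheck(mep[0][1][0]) and solidcheck(mep[0][2][0]) and solidcheck(mep[1][0][0]) and solidcheck(mep[1][2][0]) and solidcheck(mep[2][0][0], True) and solidcheck(mep[2][1][0]) and solidcheck(mep[2][2][0], True):
--         return [4,4]
--     elif solidcheck(mep[0][0][0], True) and solidcheck(mep[0][1][0]) and solidcheck(mep[0][2][0], True) and solidcheck(mep[1][0][0]) and solidcheck(mep[1][2][0]) and solidcheck(mep[2][0][0]) and solidcheck(mep[2][1][0]) and solidcheck(mep[2][2][0], True):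
--         return [5,3]
--     elif solidcheck(mep[0][0][0], True) and solidcheck(mep[0][1][0]) and solidcheck(mep[0][2][0], True) and solidcheck(mep[1][0][0]) and solidcheck(mep[1][2][0]) and solidcheck(mep[2][0][0], True) and solidcheck(mep[2][1][0]) and solidcheck(mep[2][2][0]):
--         return [4,3]
--     elif solidcheck(mep[0][0][0]) and solidcheck(mep[0][1][0]) and solidcheck(mep[0][2][0]) and solidcheck(mep[1][0][0]) and solidcheck(mep[1][2][0]) and solidcheck(mep[2][0][0]) and solidcheck(mep[2][1][0]) and solidcheck(mep[2][2][0], True):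
--         return [4,1]
--     elif solidcheck(mep[0][0][0]) and solidcheck(mep[0][1][0]) and solidcheck(mep[0][2][0]) and solidcheck(mep[1][0][0]) and solidcheck(mep[1][2][0]) and solidcheck(mep[2][0][0],True) and solidcheck(mep[2][1][0]) and solidcheck(mep[2][2][0]):
--         return [5,1]
--     elif solidcheck(mep[0][0][0]) and solidcheck(mep[0][1][0]) and solidcheck(mep[0][2][0], True) and solidcheck(mep[1][0][0]) and solidcheck(mep[1][2][0]) and solidcheck(mep[2][0][0]) and solidcheck(mep[2][1][0]) and solidcheck(mep[2][2][0]):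
--         return [4,2]
--     elif solidcheck(mep[0][0][0], True) and solidcheck(mep[0][1][0]) and solidcheck(mep[0][2][0]) and solidcheck(mep[1][0][0]) and solidcheck(mep[1][2][0]) and solidcheck(mep[2][0][0]) and solidcheck(mep[2][1][0]) and solidcheck(mep[2][2][0]):
--         return [5,2]
--     elif solidcheck(mep[0][1][0], True) and solidcheck(mep[1][0][0], True) and solidcheck(mep[1][2][0]) and solidcheck(mep[2][1][0]) and solidcheck(mep[2][2][0], True):
--         return [0,3]
--     elif solidcheck(mep[0][1][0], True) and solidcheck(mep[1][0][0]) and solidcheck(mep[1][2][0], True) and solidcheck(mep[2][0][0], True) and solidcheck(mep[2][1][0]):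
--         return [1,3]
--     elif solidcheck(mep[0][1][0]) and solidcheck(mep[0][2][0], True) and solidcheck(mep[1][0][0], True) and solidcheck(mep[1][2][0]) and solidcheck(mep[2][1][0], True):
--         return [0,4]
--     elif solidcheck(mep[0][0][0], True) and solidcheck(mep[0][1][0]) and solidcheck(mep[1][0][0]) and solidcheck(mep[1][2][0], True) and solidcheck(mep[2][1][0], True):
--         return [1,4]
--     return og
-- ===== SOURCE B (Python) =====
-- def _solid(t):
--     return t not in (0, 3, 9)
--
-- # 13 fully-specified patterns, key order (00,01,02,10,12,20,21,22), first-listed wins (all keys distinct)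
-- _TABLE = {
--     (True,  True, True,  True, True, False, True, False): [6, 1],
--     (False, True, False, True, True, True,  True, True ): [6, 2],
--     (False, True, True,  True, True, False, True, True ): [7, 3],
--     (True,  True, False, True, True, True,  True, False): [6, 3],
--     (False, True, False, True, True, False, True, False): [6, 4],
--     (True,  True, False, True, True, False, True, False): [5, 4],
--     (False, True, True,  True, True, False, True, False): [4, 4],
--     (False, True, False, True, True, True,  True, False): [5, 3],
--     (False, True, False, True, True, False, True, True ): [4, 3],
--     (True,  True, True,  True, True, True,  True, False): [4, 1],
--     (True,  True, True,  True, True, False, True, True ): [5, 1],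
--     (True,  True, False, True, True, True,  True, True ): [4, 2],
--     (False, True, True,  True, True, True,  True, True ): [5, 2],
-- }
--
-- def cornerchecker(mop, og, cords):
--     mep = [[], [], []]
--     for a in range(3):
--         for b in range(3):
--             try:
--                 mep[a].append(mop[cords[0] + a - 1][cords[1] + b - 1])
--             except Exception:
--                 mep[a].append([1])
--     s00, s01, s02 = (_solid(mep[0][b][0]) for b in range(3))
--     s10, s12 = _solid(mep[1][0][0]), _solid(mep[1][2][0])
--     s20, s21, s22 = (_solid(mep[2][b][0]) for b in range(3))
--     key = (s00, s01, s02, s10, s12, s20, s21, s22)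
--     hit = _TABLE.get(key)
--     if hit is not None:
--         return hit
--     # partial patterns (only five cells constrained each), in the original order
--     if (not s01) and (not s10) and s12 and s21 and (not s22):
--         return [0, 3]
--     if (not s01) and s10 and (not s12) and (not s20) and s21:
--         return [1, 3]
--     if s01 and (not s02) and (not s10) and s12 and (not s21):
--         return [0, 4]
--     if (not s00) and s01 and s10 and (not s12) and (not s21):
--         return [1, 4]
--     return og
-- ===== Notes on version B (the rewrite author's own statement) =====
-- stated objective: simpler
-- what changed: B computes the eight neighbor-solidity booleans once into a tuple key and replaces A's 13-branch elif ladder of repeated solidcheck calls with a single dict lookup of fully-specified patterns, keeping the 4 partial-pattern fallbacks as ordered checks.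
import Mathlib
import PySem

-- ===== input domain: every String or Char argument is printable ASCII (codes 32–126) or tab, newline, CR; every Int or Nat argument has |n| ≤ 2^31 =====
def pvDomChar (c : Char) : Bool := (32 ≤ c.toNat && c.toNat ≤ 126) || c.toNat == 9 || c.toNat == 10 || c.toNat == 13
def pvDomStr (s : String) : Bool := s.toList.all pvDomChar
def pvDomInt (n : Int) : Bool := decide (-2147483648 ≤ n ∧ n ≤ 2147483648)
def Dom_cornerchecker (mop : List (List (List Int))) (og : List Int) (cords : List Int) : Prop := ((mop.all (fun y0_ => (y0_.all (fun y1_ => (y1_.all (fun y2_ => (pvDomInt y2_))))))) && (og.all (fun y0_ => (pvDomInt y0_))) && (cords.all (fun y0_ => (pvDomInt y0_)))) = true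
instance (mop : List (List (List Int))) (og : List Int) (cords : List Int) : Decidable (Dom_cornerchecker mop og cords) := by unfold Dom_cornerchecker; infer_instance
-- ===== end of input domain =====

-- B replaces A's 13-way elif ladder of repeated solidcheck calls by one precomputed 8-boolean
-- neighborhood key looked up in a pattern dict, with the 4 partial patterns as ordered fallbacks
-- (objective: simpler).

-- Shared by both ports (and Pre_): the cell Python's `try: mop[cords[0]+a-1][cords[1]+b-1] except: [1]`
-- produces (negative indices wrap, any index/lookup failure yields [1]).
def pvCell (mop : List (List (List Int))) (cords : List Int) (a b : Int) : List Int :=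
  ((do
    let c0 ← PySem.List.pyGet? cords 0
    let c1 ← PySem.List.pyGet? cords 1
    let row ← PySem.List.pyGet? mop (c0 + a - 1)
    PySem.List.pyGet? row (c1 + b - 1) : Option (List Int))).getD [1]

-- mep = [[],[],[]]; for a in range(3): for b in range(3): mep[a].append(cell)
def pvMep (mop : List (List (List Int))) (cords : List Int) : List (List (List Int)) :=
  (PySem.List.pyRange 0 3 1).foldl (fun mep a =>
    (PySem.List.pyRange 0 3 1).foldl (fun mep b =>
      mep.modify a.toNat (fun r => r ++ [pvCell mop cords a b])) mep) [[], [], []]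

-- mep[a][b][0] (all three indices are nonnegative literals; under Pre_ they are present)
def pvMepGet (mep : List (List (List Int))) (a b : Nat) : Int :=
  ((mep[a]?.bind (fun r => r[b]?)).bind (fun cl => cl[0]?)).getD 0

-- ===== PORT A =====
def pySolidcheck (thing : Int) (inv : Bool) : Bool :=
  if ¬ (thing = 0 ∨ thing = 3 ∨ thing = 9) then
    (if inv then false else true)
  else
    (if inv then true else false)

def cornerchecker (mop : List (List (List Int))) (og : List Int) (cords : List Int) : List Int :=
  let mep := pvMep mop cords
  if pySolidcheck (pvMepGet mep 0 0) false && pySolidcheck (pvMepGet mep 0 1) false && pySolidcheck (pvMepGet mep 0 2) false && pySolidcheck (pvMepGet mep 1 0) false && pySolidcheck (pvMepGet mep 1 2) false && pySolidcheck (pvMepGet mep 2 0) true && pySolidcheck (pvMepGet mep 2 1) false && pySolidcheck (pvMepGet mep 2 2) true then [6, 1]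
  else if pySolidcheck (pvMepGet mep 0 0) true && pySolidcheck (pvMepGet mep 0 1) false && pySolidcheck (pvMepGet mep 0 2) true && pySolidcheck (pvMepGet mep 1 0) false && pySolidcheck (pvMepGet mep 1 2) false && pySolidcheck (pvMepGet mep 2 0) false && pySolidcheck (pvMepGet mep 2 1) false && pySolidcheck (pvMepGet mep 2 2) false then [6, 2]
  else if pySolidcheck (pvMepGet mep 0 0) true && pySolidcheck (pvMepGet mep 0 1) false && pySolidcheck (pvMepGet mep 0 2) false && pySolidcheck (pvMepGet mep 1 0) false && pySolidcheck (pvMepGet mep 1 2) false && pySolidcheck (pvMepGet mep 2 0) true && pySolidcheck (pvMepGet mep 2 1) false && pySolidcheck (pvMepGet mep 2 2) false then [7, 3]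
  else if pySolidcheck (pvMepGet mep 0 0) false && pySolidcheck (pvMepGet mep 0 1) false && pySolidcheck (pvMepGet mep 0 2) true && pySolidcheck (pvMepGet mep 1 0) false && pySolidcheck (pvMepGet mep 1 2) false && pySolidcheck (pvMepGet mep 2 0) false && pySolidcheck (pvMepGet mep 2 1) false && pySolidcheck (pvMepGet mep 2 2) true then [6, 3]
  else if pySolidcheck (pvMepGet mep 0 0) true && pySolidcheck (pvMepGet mep 0 1) false && pySolidcheck (pvMepGet mep 0 2) true && pySolidcheck (pvMepGet mep 1 0) false && pySolidcheck (pvMepGet mep 1 2) false && pySolidcheck (pvMepGet mep 2 0) true && pySolidcheck (pvMepGet mep 2 1) false && pySolidcheck (pvMepGet mep 2 2) true then [6, 4]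
  else if pySolidcheck (pvMepGet mep 0 0) false && pySolidcheck (pvMepGet mep 0 1) false && pySolidcheck (pvMepGet mep 0 2) true && pySolidcheck (pvMepGet mep 1 0) false && pySolidcheck (pvMepGet mep 1 2) false && pySolidcheck (pvMepGet mep 2 0) true && pySolidcheck (pvMepGet mep 2 1) false && pySolidcheck (pvMepGet mep 2 2) true then [5, 4]
  else if pySolidcheck (pvMepGet mep 0 0) true && pySolidcheck (pvMepGet mep 0 1) false && pySolidcheck (pvMepGet mep 0 2) false && pySolidcheck (pvMepGet mep 1 0) false && pySolidcheck (pvMepGet mep 1 2) false && pySolidcheck (pvMepGet mep 2 0) true && pySolidcheck (pvMepGet mep 2 1) false && pySolidcheck (pvMepGet mep 2 2) true then [4, 4]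
  else if pySolidcheck (pvMepGet mep 0 0) true && pySolidcheck (pvMepGet mep 0 1) false && pySolidcheck (pvMepGet mep 0 2) true && pySolidcheck (pvMepGet mep 1 0) false && pySolidcheck (pvMepGet mep 1 2) false && pySolidcheck (pvMepGet mep 2 0) false && pySolidcheck (pvMepGet mep 2 1) false && pySolidcheck (pvMepGet mep 2 2) true then [5, 3]
  else if pySolidcheck (pvMepGet mep 0 0) true && pySolidcheck (pvMepGet mep 0 1) false && pySolidcheck (pvMepGet mep 0 2) true && pySolidcheck (pvMepGet mep 1 0) false && pySolidcheck (pvMepGet mep 1 2) false && pySolidcheck (pvMepGet mep 2 0) true && pySolidcheck (pvMepGet mep 2 1) false && pySolidcheck (pvMepGet mep 2 2) false then [4, 3]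
  else if pySolidcheck (pvMepGet mep 0 0) false && pySolidcheck (pvMepGet mep 0 1) false && pySolidcheck (pvMepGet mep 0 2) false && pySolidcheck (pvMepGet mep 1 0) false && pySolidcheck (pvMepGet mep 1 2) false && pySolidcheck (pvMepGet mep 2 0) false && pySolidcheck (pvMepGet mep 2 1) false && pySolidcheck (pvMepGet mep 2 2) true then [4, 1]
  else if pySolidcheck (pvMepGet mep 0 0) false && pySolidcheck (pvMepGet mep 0 1) false && pySolidcheck (pvMepGet mep 0 2) false && pySolidcheck (pvMepGet mep 1 0) false && pySolidcheck (pvMepGet mep 1 2) false && pySolidcheck (pvMepGet mep 2 0) true && pySolidcheck (pvMepGet mep 2 1) false && pySolidcheck (pvMepGet mep 2 2) false then [5, 1]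
  else if pySolidcheck (pvMepGet mep 0 0) false && pySolidcheck (pvMepGet mep 0 1) false && pySolidcheck (pvMepGet mep 0 2) true && pySolidcheck (pvMepGet mep 1 0) false && pySolidcheck (pvMepGet mep 1 2) false && pySolidcheck (pvMepGet mep 2 0) false && pySolidcheck (pvMepGet mep 2 1) false && pySolidcheck (pvMepGet mep 2 2) false then [4, 2]
  else if pySolidcheck (pvMepGet mep 0 0) true && pySolidcheck (pvMepGet mep 0 1) false && pySolidcheck (pvMepGet mep 0 2) false && pySolidcheck (pvMepGet mep 1 0) false && pySolidcheck (pvMepGet mep 1 2) false && pySolidcheck (pvMepGet mep 2 0) false && pySolidcheck (pvMepGet mep 2 1) false && pySolidcheck (pvMepGet mep 2 2) false then [5, 2]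
  else if pySolidcheck (pvMepGet mep 0 1) true && pySolidcheck (pvMepGet mep 1 0) true && pySolidcheck (pvMepGet mep 1 2) false && pySolidcheck (pvMepGet mep 2 1) false && pySolidcheck (pvMepGet mep 2 2) true then [0, 3]
  else if pySolidcheck (pvMepGet mep 0 1) true && pySolidcheck (pvMepGet mep 1 0) false && pySolidcheck (pvMepGet mep 1 2) true && pySolidcheck (pvMepGet mep 2 0) true && pySolidcheck (pvMepGet mep 2 1) false then [1, 3]
  else if pySolidcheck (pvMepGet mep 0 1) false && pySolidcheck (pvMepGet mep 0 2) true && pySolidcheck (pvMepGet mep 1 0) true && pySolidcheck (pvMepGet mep 1 2) false && pySolidcheck (pvMepGet mep 2 1) true then [0, 4]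
  else if pySolidcheck (pvMepGet mep 0 0) true && pySolidcheck (pvMepGet mep 0 1) false && pySolidcheck (pvMepGet mep 1 0) false && pySolidcheck (pvMepGet mep 1 2) true && pySolidcheck (pvMepGet mep 2 1) true then [1, 4]
  else og

-- ===== PORT B =====
def solidB (t : Int) : Bool := !(t == 0 || t == 3 || t == 9)

def tableB : PySem.Dict (List Bool) (List Int) := PySem.Dict.ofList [
  ([true, true, true, true, true, false, true, false], [6, 1]),
  ([false, true, false, true, true, true, true, true], [6, 2]),
  ([false, true, true, true, true, false, true, true], [7, 3]),
  ([true, true, false, true, true, true, true, false], [6, 3]),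
  ([false, true, false, true, true, false, true, false], [6, 4]),
  ([true, true, false, true, true, false, true, false], [5, 4]),
  ([false, true, true, true, true, false, true, false], [4, 4]),
  ([false, true, false, true, true, true, true, false], [5, 3]),
  ([false, true, false, true, true, false, true, true], [4, 3]),
  ([true, true, true, true, true, true, true, false], [4, 1]),
  ([true, true, true, true, true, false, true, true], [5, 1]),
  ([true, true, false, true, true, true, true, true], [4, 2]),
  ([false, true, true, true, true, true, true, true], [5, 2])
]

def cornerchecker_alt (mop : List (List (List Int))) (og : List Int) (cords : List Int) : List Int :=
  let mep := pvMep mop cords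
  let s00 := solidB (pvMepGet mep 0 0)
  let s01 := solidB (pvMepGet mep 0 1)
  let s02 := solidB (pvMepGet mep 0 2)
  let s10 := solidB (pvMepGet mep 1 0)
  let s12 := solidB (pvMepGet mep 1 2)
  let s20 := solidB (pvMepGet mep 2 0)
  let s21 := solidB (pvMepGet mep 2 1)
  let s22 := solidB (pvMepGet mep 2 2)
  match tableB.get? [s00, s01, s02, s10, s12, s20, s21, s22] with
  | some v => v
  | none =>
    if !s01 && !s10 && s12 && s21 && !s22 then [0, 3]
    else if !s01 && s10 && !s12 && !s20 && s21 then [1, 3]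
    else if s01 && !s02 && !s10 && s12 && !s21 then [0, 4]
    else if !s00 && s01 && s10 && !s12 && !s21 then [1, 4]
    else og

-- ===== PRECONDITION & SPEC =====
-- Pre_ requires the eight accessed non-center neighborhood cells to be nonempty lists: on inputs with
-- an empty accessed cell Python A raises IndexError at mep[a][b][0] on most of them and returns og only
-- when short-circuit evaluation happens to skip the empty cell, while B (which inspects all eight cells
-- up front) raises there; those inputs are excluded.
def Pre_cornerchecker (mop : List (List (List Int))) (og : List Int) (cords : List Int) : Prop :=
  ∀ p ∈ [((0:Int),(0:Int)), (0,1), (0,2), (1,0), (1,2), (2,0), (2,1), (2,2)],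
    pvCell mop cords p.1 p.2 ≠ ([] : List Int)
instance (mop : List (List (List Int))) (og : List Int) (cords : List Int) : Decidable (Pre_cornerchecker mop og cords) := by unfold Pre_cornerchecker; infer_instance

def pvWitness_cornerchecker : List (List (List Int)) × List Int × List Int := ([[[5]]], [1], [0, 0])

def Spec_cornerchecker (mop : List (List (List Int))) (og : List Int) (cords : List Int) (out : List Int) : Prop := out = cornerchecker_alt mop og cords
instance (mop : List (List (List Int))) (og : List Int) (cords : List Int) (out : List Int) : Decidable (Spec_cornerchecker mop og cords out) := by unfold Spec_cornerchecker; infer_instance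

-- ===== CLAIM (what is proved, stated in full; the proofs are below) =====
def Claim_equal_cornerchecker : Prop := ∀ (mop : List (List (List Int))) (og : List Int) (cords : List Int), Dom_cornerchecker mop og cords → Pre_cornerchecker mop og cords → Spec_cornerchecker mop og cords (cornerchecker mop og cords)

-- ===== LEMMAS AND PROOFS =====

theorem pySolidcheck_true_eq (t : Int) : pySolidcheck t true = !pySolidcheck t false := by
  unfold pySolidcheck
  by_cases h : t = 0 ∨ t = 3 ∨ t = 9 <;> simp [h]

theorem solidB_eq (t : Int) : solidB t = pySolidcheck t false := by
  unfold solidB pySolidcheck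
  by_cases h0 : t = 0 <;> by_cases h3 : t = 3 <;> by_cases h9 : t = 9 <;> simp [h0, h3, h9]

-- ===== VERDICT (by name: the statement is the Claim_ definition above) =====
theorem cornerchecker_spec : Claim_equal_cornerchecker := by
  intro mop og cords _ _
  unfold Spec_cornerchecker cornerchecker cornerchecker_alt
  simp only [pySolidcheck_true_eq, solidB_eq]
  generalize pySolidcheck (pvMepGet (pvMep mop cords) 0 0) false = s00
  generalize pySolidcheck (pvMepGet (pvMep mop cords) 0 1) false = s01
  generalize pySolidcheck (pvMepGet (pvMep mop cords) 0 2) false = s02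
  generalize pySolidcheck (pvMepGet (pvMep mop cords) 1 0) false = s10
  generalize pySolidcheck (pvMepGet (pvMep mop cords) 1 2) false = s12
  generalize pySolidcheck (pvMepGet (pvMep mop cords) 2 0) false = s20
  generalize pySolidcheck (pvMepGet (pvMep mop cords) 2 1) false = s21
  generalize pySolidcheck (pvMepGet (pvMep mop cords) 2 2) false = s22
  cases s00 <;> cases s01 <;> cases s02 <;> cases s10 <;> cases s12 <;>
    cases s20 <;> cases s21 <;> cases s22 <;> rfl
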